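-- pv_equiv track=rewrite | github.com/gyrogovernance/superintelligence | tests/test_aQPU_SDK_3.py | gf64_multiply_as_gf2_matrix
-- ===== SOURCE A (Python) =====
-- GF64_POLY = 0x43   # x^6 + x + 1
--
-- GF64_MASK = 0x3F
--
-- def gf64_multiply(a: int, b: int) -> int:
--     a &= GF64_MASK
--     b &= GF64_MASK
--     out = 0
--     while b:
--         if b & 1:
--             out ^= a
--         b >>= 1
--         a <<= 1
--         if a & 0x40:
--             a ^= GF64_POLY
--         a &= 0x7F
--     return out & GF64_MASK
--
-- def gf64_multiply_as_gf2_matrix(element: int) -> tuple[int, ...]: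
--     cols = [gf64_multiply(element, 1 << j) for j in range(6)]
--     rows = []
--     for r in range(6):
--         row = 0
--         for j, col in enumerate(cols):
--             if (col >> r) & 1:
--                 row |= 1 << j
--         rows.append(row)
--     return tuple(rows)
-- ===== SOURCE B (Python) =====
-- def gf64_multiply_as_gf2_matrix(element: int) -> tuple[int, ...]:
--     # One cumulative xtime recurrence: col holds element * x^j (mod x^6+x+1);
--     # each column's bits are written straight into the six row accumulators.
--     col = element & 0x3F
--     rows = [0, 0, 0, 0, 0, 0]
--     for j in range(6):
--         for r in range(6):
--             rows[r] |= ((col >> r) & 1) << j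
--         col = ((col << 1) ^ (0x43 if col & 0x20 else 0)) & 0x3F
--     return tuple(rows)
-- ===== Notes on version B (the rewrite author's own statement) =====
-- stated objective: alternative
-- what changed: Replaces six independent bit-by-bit gf64_multiply calls followed by a separate transpose pass with a single loop threading one cumulative xtime (doubling) recurrence for element*x^j and writing each column's bits directly into six row accumulators.
import Mathlib
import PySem

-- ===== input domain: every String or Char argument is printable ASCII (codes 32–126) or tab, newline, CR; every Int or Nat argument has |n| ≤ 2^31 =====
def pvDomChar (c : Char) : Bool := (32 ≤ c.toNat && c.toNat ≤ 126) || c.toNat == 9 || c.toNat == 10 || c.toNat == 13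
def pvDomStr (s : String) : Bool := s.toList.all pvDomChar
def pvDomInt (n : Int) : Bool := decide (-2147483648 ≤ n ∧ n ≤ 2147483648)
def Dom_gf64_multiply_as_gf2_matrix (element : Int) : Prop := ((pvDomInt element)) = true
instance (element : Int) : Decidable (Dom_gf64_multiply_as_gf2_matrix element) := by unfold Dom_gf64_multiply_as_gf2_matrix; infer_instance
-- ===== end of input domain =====

-- B replaces six independent bit-by-bit GF(64) multiplications plus a transpose pass
-- with one cumulative xtime recurrence filling six row accumulators in a single loop.


-- ===== PORT A =====
-- 'while b:' loop of gf64_multiply; fuel starts at b and only guards totality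
-- (b halves each step, so fuel ≥ b is preserved and the fuel-0 branch is unreachable).
def gf64MulLoop : Nat → Nat → Int → Int → Int
  | _, 0, _, out => out
  | 0, _, _, out => out
  | fuel+1, b, a, out =>
      let out' := if b % 2 = 1 then PySem.Int.bxor out a else out
      let b' := b / 2
      let a1 := a <<< 1
      let a2 := if PySem.Int.band a1 64 ≠ 0 then PySem.Int.bxor a1 67 else a1
      let a3 := PySem.Int.band a2 127
      gf64MulLoop fuel b' a3 out'

def gf64_multiply (a b : Int) : Int :=
  let a0 := PySem.Int.band a 63
  let bn := (PySem.Int.band b 63).toNat   -- exact: b & 0x3F is nonnegative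
  PySem.Int.band (gf64MulLoop bn bn a0 0) 63

def gf64_multiply_as_gf2_matrix (element : Int) : List Int :=
  let cols := (List.range 6).map (fun j => gf64_multiply element ((1:Int) <<< j))
  (List.range 6).foldl (fun rows r =>
    rows ++ [(PySem.List.enumerate cols).foldl (fun row jc =>
      if PySem.Int.band (jc.2 >>> r) 1 ≠ 0 then PySem.Int.bor row ((1:Int) <<< jc.1) else row) 0]) []

-- ===== PORT B =====
def gf64XtimeMasked (col : Int) : Int :=
  PySem.Int.band (PySem.Int.bxor (col <<< 1) (if PySem.Int.band col 32 ≠ 0 then 67 else 0)) 63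

def gf64_multiply_as_gf2_matrix_alt (element : Int) : List Int :=
  let st := (List.range 6).foldl (fun (st : List Int × Int) j =>
      let rows := (List.range 6).foldl (fun rows r =>
          rows.set r (PySem.Int.bor (rows.getD r 0) ((PySem.Int.band (st.2 >>> r) 1) <<< j))) st.1
      (rows, gf64XtimeMasked st.2))
    ([0, 0, 0, 0, 0, 0], PySem.Int.band element 63)
  st.1

-- ===== PRECONDITION & SPEC =====
def Spec_gf64_multiply_as_gf2_matrix (element : Int) (out : List Int) : Prop := out = gf64_multiply_as_gf2_matrix_alt element
instance (element : Int) (out : List Int) : Decidable (Spec_gf64_multiply_as_gf2_matrix element out) := by unfold Spec_gf64_multiply_as_gf2_matrix; infer_instance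

-- ===== CLAIM (what is proved, stated in full; the proofs are below) =====
def Claim_equal_gf64_multiply_as_gf2_matrix : Prop := ∀ (element : Int), Dom_gf64_multiply_as_gf2_matrix element → Spec_gf64_multiply_as_gf2_matrix element (gf64_multiply_as_gf2_matrix element)

-- ===== LEMMAS AND PROOFS =====
lemma band63_emod (e : Int) : PySem.Int.band e 63 = e % 64 := by
  have h1 : ∀ n : Nat, n &&& 63 = n % 64 := fun n => by
    have := Nat.and_two_pow_sub_one_eq_mod n 6
    norm_num at this; exact this
  have h2 : ∀ n : Nat, 63 &&& n = n % 64 := fun n => by rw [Nat.and_comm]; exact h1 n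
  unfold PySem.Int.band
  rw [show Int.toNat 63 = 63 from rfl]
  split_ifs with h h' h''
  · rw [h1]; push_cast [Int.toNat_of_nonneg h]; rfl
  · norm_num at h'
  · rw [h2]
    have hle : (-e - 1).toNat % 64 ≤ 63 := by omega
    have hne : (0:Int) ≤ -e - 1 := by omega
    push_cast [Nat.cast_sub hle, Int.toNat_of_nonneg hne]
    omega
  · norm_num at h''

lemma A_mask (e : Int) : gf64_multiply_as_gf2_matrix e = gf64_multiply_as_gf2_matrix (e % 64) := by
  simp only [gf64_multiply_as_gf2_matrix, gf64_multiply, band63_emod,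
    Int.emod_emod_of_dvd _ (dvd_refl 64)]

lemma B_mask (e : Int) : gf64_multiply_as_gf2_matrix_alt e = gf64_multiply_as_gf2_matrix_alt (e % 64) := by
  simp only [gf64_multiply_as_gf2_matrix_alt, band63_emod,
    Int.emod_emod_of_dvd _ (dvd_refl 64)]

set_option maxRecDepth 10000 in
lemma small_eq : ∀ m : Nat, m < 64 →
    gf64_multiply_as_gf2_matrix (m : Int) = gf64_multiply_as_gf2_matrix_alt (m : Int) := by
  decide

-- ===== VERDICT (by name: the statement is the Claim_ definition above) =====
theorem gf64_multiply_as_gf2_matrix_spec : Claim_equal_gf64_multiply_as_gf2_matrix := by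
  intro element _
  unfold Spec_gf64_multiply_as_gf2_matrix
  rw [A_mask, B_mask]
  obtain ⟨m, hm, he⟩ : ∃ m : Nat, m < 64 ∧ element % 64 = (m : Int) :=
    ⟨(element % 64).toNat, by omega, by omega⟩
  rw [he]
  exact small_eq m hm
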